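-- pv_equiv track=rewrite | github.com/mrzzmrzz/NABench | scripts/garnet/runcv.py | rna_AUGCgap_only
-- ===== SOURCE A (Python) =====
-- def rna_AUGCgap_only(string):
--     """Cleans up RNA fasta formatting."""
--     if not isinstance(string, str):
--         return ""
--     for char in ['R', 'N', 'W', 'V', 'D', 'Z', 'n', 'a']:
--         string = string.replace(char, 'A')
--     for char in ['Y', 'K', 'B', 'H', 'u', 'T']:
--         string = string.replace(char, 'U')
--     for char in ['M', 'S', 'c']:
--         string = string.replace(char, 'C')
--     string = string.replace('g', 'G')
--     for char in ['\n', ' ', '.']: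
--         string = string.replace(char, '')
--     return string
-- ===== SOURCE B (Python) =====
-- _TRANS = str.maketrans({'R': 'A', 'N': 'A', 'W': 'A', 'V': 'A', 'D': 'A', 'Z': 'A',
--                         'n': 'A', 'a': 'A',
--                         'Y': 'U', 'K': 'U', 'B': 'U', 'H': 'U', 'u': 'U', 'T': 'U',
--                         'M': 'C', 'S': 'C', 'c': 'C',
--                         'g': 'G',
--                         '\n': None, ' ': None, '.': None})
--
--
-- def rna_AUGCgap_only(string):
--     """Cleans up RNA fasta formatting."""
--     if not isinstance(string, str):
--         return ""
--     return string.translate(_TRANS)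
-- ===== Notes on version B (the rewrite author's own statement) =====
-- stated objective: faster
-- what changed: Replaces fifteen sequential str.replace scans with one translation table built once and a single str.translate pass over the input.
import Mathlib
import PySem

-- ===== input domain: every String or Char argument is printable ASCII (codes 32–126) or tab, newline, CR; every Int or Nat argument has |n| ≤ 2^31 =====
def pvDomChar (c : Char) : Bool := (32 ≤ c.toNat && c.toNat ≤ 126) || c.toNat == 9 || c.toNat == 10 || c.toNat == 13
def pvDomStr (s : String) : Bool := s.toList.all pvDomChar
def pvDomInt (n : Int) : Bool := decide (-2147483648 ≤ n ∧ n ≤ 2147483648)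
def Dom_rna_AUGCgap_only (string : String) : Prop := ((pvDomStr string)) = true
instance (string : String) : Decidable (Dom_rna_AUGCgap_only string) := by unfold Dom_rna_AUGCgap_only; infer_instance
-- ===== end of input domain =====

-- B replaces A's fifteen sequential str.replace scans with one translation table and a single pass (str.translate); return value only, equivalence proved on all strings.

-- ===== PORT A =====
def rna_AUGCgap_only (string : String) : String :=
  let s1 := ["R", "N", "W", "V", "D", "Z", "n", "a"].foldl
    (fun s ch => PySem.Str.replace s ch "A") string
  let s2 := ["Y", "K", "B", "H", "u", "T"].foldl
    (fun s ch => PySem.Str.replace s ch "U") s1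
  let s3 := ["M", "S", "c"].foldl
    (fun s ch => PySem.Str.replace s ch "C") s2
  let s4 := PySem.Str.replace s3 "g" "G"
  let s5 := ["\n", " ", "."].foldl
    (fun s ch => PySem.Str.replace s ch "") s4
  s5

-- ===== PORT B =====
-- the translation table built once (Python: str.maketrans dict; `none` = delete the character)
def pvTrans : PySem.Dict Char (Option Char) := PySem.Dict.ofList
  [('R', some 'A'), ('N', some 'A'), ('W', some 'A'), ('V', some 'A'), ('D', some 'A'),
   ('Z', some 'A'), ('n', some 'A'), ('a', some 'A'),
   ('Y', some 'U'), ('K', some 'U'), ('B', some 'U'), ('H', some 'U'), ('u', some 'U'),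
   ('T', some 'U'),
   ('M', some 'C'), ('S', some 'C'), ('c', some 'C'),
   ('g', some 'G'),
   ('\n', none), (' ', none), ('.', none)]

-- str.translate: one pass, each char looked up in the table (absent ⇒ kept, `none` ⇒ dropped)
def rna_AUGCgap_only_alt (string : String) : String :=
  String.ofList (string.toList.filterMap
    (fun c => (PySem.Dict.get? pvTrans c).getD (some c)))

-- ===== PRECONDITION & SPEC =====
def Spec_rna_AUGCgap_only (string : String) (out : String) : Prop := out = rna_AUGCgap_only_alt string
instance (string : String) (out : String) : Decidable (Spec_rna_AUGCgap_only string out) := by unfold Spec_rna_AUGCgap_only; infer_instance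

-- ===== CLAIM (what is proved, stated in full; the proofs are below) =====
def Claim_equal_rna_AUGCgap_only : Prop := ∀ (string : String), Dom_rna_AUGCgap_only string → Spec_rna_AUGCgap_only string (rna_AUGCgap_only string)

-- ===== LEMMAS AND PROOFS =====

-- single-character replace is a flatMap over the characters
theorem replace_go_single (o : Char) (new : List Char) (l : List Char) :
    ∀ (fuel : Nat) (acc : List Char), l.length ≤ fuel →
      PySem.Chars.replace.go [o] new fuel l acc
        = acc.reverse ++ l.flatMap (fun c => if c = o then new else [c]) := by
  induction l with
  | nil =>
    intro fuel acc _
    cases fuel <;> simp [PySem.Chars.replace.go]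
  | cons c t ih =>
    intro fuel acc h
    cases fuel with
    | zero => simp at h
    | succ fuel =>
      rw [PySem.Chars.replace.go]
      by_cases hc : c = o
      · subst hc
        rw [if_pos (by simp [List.isPrefixOf])]
        simp only [List.length_cons, List.length_nil, Nat.zero_add, List.drop_succ_cons,
          List.drop_zero]
        rw [ih fuel _ (by simpa using Nat.le_of_succ_le_succ h)]
        simp
      · rw [if_neg (by simp [List.isPrefixOf]; exact fun h' => hc h'.symm)]
        rw [ih fuel _ (by simpa using Nat.le_of_succ_le_succ h)]
        simp [hc]

theorem replace_single (s : List Char) (o : Char) (new : List Char) :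
    PySem.Chars.replace s [o] new
      = s.flatMap (fun c => if c = o then new else [c]) := by
  rw [PySem.Chars.replace]
  simp only [List.isEmpty_cons, if_neg Bool.false_ne_true]
  exact replace_go_single o new s s.length [] le_rfl

-- the per-character action of A's fifteen replaces, as a single Option-valued function
theorem flatMap_if_eq_filterMap (s : List Char) (o n : Char) :
    s.flatMap (fun c => if c = o then [n] else [c])
      = s.filterMap (fun c => some (if c = o then n else c)) := by
  induction s with
  | nil => rfl
  | cons c t ih => by_cases h : c = o <;> simp [h, ih]

theorem flatMap_del_eq_filterMap (s : List Char) (o : Char) :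
    s.flatMap (fun c => if c = o then [] else [c])
      = s.filterMap (fun c => if c = o then none else some c) := by
  induction s with
  | nil => rfl
  | cons c t ih => by_cases h : c = o <;> simp [h, ih]

-- the composite of A's per-character actions equals B's table lookup
theorem per_char_eq (c : Char) :
    (((((((((((((((((((((some (if c = 'R' then 'A' else c)).bind fun c => some (if c = 'N' then 'A' else c)).bind fun c => some (if c = 'W' then 'A' else c)).bind fun c => some (if c = 'V' then 'A' else c)).bind fun c => some (if c = 'D' then 'A' else c)).bind fun c => some (if c = 'Z' then 'A' else c)).bind fun c => some (if c = 'n' then 'A' else c)).bind fun c => some (if c = 'a' then 'A' else c)).bind fun c => some (if c = 'Y' then 'U' else c)).bind fun c => some (if c = 'K' then 'U' else c)).bind fun c => some (if c = 'B' then 'U' else c)).bind fun c => some (if c = 'H' then 'U' else c)).bind fun c => some (if c = 'u' then 'U' else c)).bind fun c => some (if c = 'T' then 'U' else c)).bind fun c => some (if c = 'M' then 'C' else c)).bind fun c => some (if c = 'S' then 'C' else c)).bind fun c => some (if c = 'c' then 'C' else c)).bind fun c => some (if c = 'g' then 'G' else c)).bind fun c => if c = '\n' then none else some c).bind fun c =>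 if c = ' ' then none else some c).bind fun c => if c = '.' then none else some c)
      = (PySem.Dict.get? pvTrans c).getD (some c) := by
  by_cases h : c ∈ ['R','N','W','V','D','Z','n','a','Y','K','B','H','u','T','M','S','c','g','\n',' ','.']
  · fin_cases h <;> decide
  · simp only [List.mem_cons, List.not_mem_nil, or_false, not_or] at h
    obtain ⟨h1,h2,h3,h4,h5,h6,h7,h8,h9,h10,h11,h12,h13,h14,h15,h16,h17,h18,h19,h20,h21⟩ := h
    have hp : pvTrans = PySem.Dict.mk
      [('R', some 'A'), ('N', some 'A'), ('W', some 'A'), ('V', some 'A'), ('D', some 'A'),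
       ('Z', some 'A'), ('n', some 'A'), ('a', some 'A'),
       ('Y', some 'U'), ('K', some 'U'), ('B', some 'U'), ('H', some 'U'), ('u', some 'U'),
       ('T', some 'U'),
       ('M', some 'C'), ('S', some 'C'), ('c', some 'C'),
       ('g', some 'G'),
       ('\n', none), (' ', none), ('.', none)] := by decide
    rw [hp]
    simp [PySem.Dict.get?, Ne.symm h1, Ne.symm h2, Ne.symm h3,
      Ne.symm h4, Ne.symm h5, Ne.symm h6, Ne.symm h7, Ne.symm h8, Ne.symm h9, Ne.symm h10,
      Ne.symm h11, Ne.symm h12, Ne.symm h13, Ne.symm h14, Ne.symm h15, Ne.symm h16,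
      Ne.symm h17, Ne.symm h18, Ne.symm h19, Ne.symm h20, Ne.symm h21,
      h1,h2,h3,h4,h5,h6,h7,h8,h9,h10,h11,h12,h13,h14,h15,h16,h17,h18,h19,h20,h21]

-- ===== VERDICT (by name: the statement is the Claim_ definition above) =====
set_option maxHeartbeats 2000000 in
theorem rna_AUGCgap_only_spec : Claim_equal_rna_AUGCgap_only := by
  intro string _
  unfold Spec_rna_AUGCgap_only rna_AUGCgap_only rna_AUGCgap_only_alt
  simp only [List.foldl_cons, List.foldl_nil, PySem.Str.replace]
  simp only [show ("R" : String).toList = ['R'] by decide,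
    show ("N" : String).toList = ['N'] by decide,
    show ("W" : String).toList = ['W'] by decide,
    show ("V" : String).toList = ['V'] by decide,
    show ("D" : String).toList = ['D'] by decide,
    show ("Z" : String).toList = ['Z'] by decide,
    show ("n" : String).toList = ['n'] by decide,
    show ("a" : String).toList = ['a'] by decide,
    show ("Y" : String).toList = ['Y'] by decide,
    show ("K" : String).toList = ['K'] by decide,
    show ("B" : String).toList = ['B'] by decide,
    show ("H" : String).toList = ['H'] by decide,
    show ("u" : String).toList = ['u'] by decide,
    show ("T" : String).toList = ['T'] by decide,
    show ("M" : String).toList = ['M'] by decide,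
    show ("S" : String).toList = ['S'] by decide,
    show ("c" : String).toList = ['c'] by decide,
    show ("g" : String).toList = ['g'] by decide,
    show ("\n" : String).toList = ['\n'] by decide,
    show (" " : String).toList = [' '] by decide,
    show ("." : String).toList = ['.'] by decide,
    show ("A" : String).toList = ['A'] by decide,
    show ("U" : String).toList = ['U'] by decide,
    show ("C" : String).toList = ['C'] by decide,
    show ("G" : String).toList = ['G'] by decide,
    show ("" : String).toList = ([] : List Char) by decide]
  simp only [String.toList_ofList, replace_single]
  refine congrArg String.ofList ?_
  simp only [flatMap_if_eq_filterMap, flatMap_del_eq_filterMap, List.filterMap_filterMap]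
  apply List.filterMap_congr
  intro c _
  exact per_char_eq c
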